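-- pv_equiv track=rewrite | github.com/fabaff/forbidden | src/forbidden/forbidden.py | __get_url_headers
-- ===== SOURCE A (Python) =====
-- def unique(sequence):
-- 	seen = set()
-- 	return [x for x in sequence if not (x in seen or seen.add(x))]
--
-- def __get_url_headers(values):
-- 	tmp = []
-- 	# --------------------------------
-- 	headers = [
-- 		"19-Profile",
-- 		"Base-URL",
-- 		"Destination",
-- 		"Origin",
-- 		"Profile",
-- 		"Proxy",
-- 		"Referer",
-- 		"Request-URI",
-- 		"URI",
-- 		"URL",
-- 		"WAP-Profile",
-- 		"X-Forwarded-Path",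
-- 		"X-HTTP-DestinationURL",
-- 		"X-Original-URL",
-- 		"X-Override-URL",
-- 		"X-Proxy-URL",
-- 		"X-Referer",
-- 		"X-Rewrite-URL",
-- 		"X-Wap-Profile"
-- 	]
-- 	for header in headers:
-- 		for value in values:
-- 			tmp.append(("{0}: {1}").format(header, value))
-- 	# --------------------------------
-- 	return unique(tmp)
-- ===== SOURCE B (Python) =====
-- def __get_url_headers(values):
-- 	headers = [
-- 		"19-Profile",
-- 		"Base-URL",
-- 		"Destination",
-- 		"Origin",
-- 		"Profile",
-- 		"Proxy",
-- 		"Referer",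
-- 		"Request-URI",
-- 		"URI",
-- 		"URL",
-- 		"WAP-Profile",
-- 		"X-Forwarded-Path",
-- 		"X-HTTP-DestinationURL",
-- 		"X-Original-URL",
-- 		"X-Override-URL",
-- 		"X-Proxy-URL",
-- 		"X-Referer",
-- 		"X-Rewrite-URL",
-- 		"X-Wap-Profile"
-- 	]
-- 	# dedupe the values once up front (first occurrence kept); since no header is a
-- 	# colon-free prefix of another, the product of distinct headers with distinct
-- 	# values contains no duplicates, so no further dedup pass is needed.
-- 	kept = list(dict.fromkeys(values))
-- 	return ["{0}: {1}".format(header, value) for header in headers for value in kept]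
-- ===== Notes on version B (the rewrite author's own statement) =====
-- stated objective: simpler
-- what changed: B deduplicates the input values once before building the header:value product (relying on no header being a prefix of another, so the product of distinct values is already duplicate-free), instead of building the full product and then deduplicating it.
import Mathlib
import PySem

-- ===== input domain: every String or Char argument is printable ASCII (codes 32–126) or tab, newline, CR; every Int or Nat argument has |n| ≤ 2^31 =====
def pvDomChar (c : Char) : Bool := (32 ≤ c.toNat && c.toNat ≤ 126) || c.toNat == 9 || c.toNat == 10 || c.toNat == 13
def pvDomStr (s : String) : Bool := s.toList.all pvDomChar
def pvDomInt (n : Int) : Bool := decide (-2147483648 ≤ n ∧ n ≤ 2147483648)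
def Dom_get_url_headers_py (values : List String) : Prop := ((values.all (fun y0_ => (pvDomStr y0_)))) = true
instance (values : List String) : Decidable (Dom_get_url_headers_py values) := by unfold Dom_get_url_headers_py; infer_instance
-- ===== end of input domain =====

-- B deduplicates the input values once up front and then emits the header:value
-- product with no further dedup (no header is a prefix of another, so no cross-header
-- collisions are possible); A builds the full product and deduplicates it afterwards.

-- the fixed header list (the same literal in both Pythons)
def pvHeaders : List String :=
  ["19-Profile", "Base-URL", "Destination", "Origin", "Profile", "Proxy", "Referer",
   "Request-URI", "URI", "URL", "WAP-Profile", "X-Forwarded-Path",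
   "X-HTTP-DestinationURL", "X-Original-URL", "X-Override-URL", "X-Proxy-URL",
   "X-Referer", "X-Rewrite-URL", "X-Wap-Profile"]

-- ===== PORT A =====
-- 'unique(sequence)': comprehension keeping x when x not in seen, adding it to the set
def uniquePy (sequence : List String) : List String :=
  (sequence.foldl
    (fun (p : PySem.Set String × List String) x =>
      if PySem.Set.contains p.1 x then p else (PySem.Set.add p.1 x, p.2 ++ [x]))
    (PySem.Set.empty, [])).2

def get_url_headers_py (values : List String) : List String :=
  -- nested for-loops appending "{0}: {1}".format(header, value) to tmp, then unique(tmp)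
  let tmp :=
    pvHeaders.foldl
      (fun tmp header =>
        values.foldl (fun tmp value => tmp ++ [header ++ ": " ++ value]) tmp)
      []
  uniquePy tmp

-- ===== PORT B =====
def get_url_headers_py_alt (values : List String) : List String :=
  -- kept = list(dict.fromkeys(values)); then the comprehension over headers × kept
  let kept := PySem.List.dedup values
  pvHeaders.flatMap (fun header => kept.map (fun value => header ++ ": " ++ value))

-- ===== PRECONDITION & SPEC =====
def Spec_get_url_headers_py (values : List String) (out : List String) : Prop := out = get_url_headers_py_alt values
instance (values : List String) (out : List String) : Decidable (Spec_get_url_headers_py values out) := by unfold Spec_get_url_headers_py; infer_instance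

-- ===== CLAIM (what is proved, stated in full; the proofs are below) =====
def Claim_equal_get_url_headers_py : Prop := ∀ (values : List String), Dom_get_url_headers_py values → Spec_get_url_headers_py values (get_url_headers_py values)

-- ===== LEMMAS AND PROOFS =====

-- dedup-with-a-seen-set, in recursive form (proof vehicle for both ports)
def dAux (s : List String) : List String → List String
  | [] => []
  | x :: xs => if x ∈ s then dAux s xs else x :: dAux (s ++ [x]) xs

lemma set_add_eq (s : List String) (x : String) :
    PySem.Set.add s x = if x ∈ s then s else s ++ [x] := by
  simp [PySem.Set.add, PySem.Set.contains]

lemma uniquePy_pair (l : List String) : ∀ s : List String,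
    l.foldl (fun (p : PySem.Set String × List String) x =>
      if PySem.Set.contains p.1 x then p else (PySem.Set.add p.1 x, p.2 ++ [x])) (s, s)
    = (s ++ dAux s l, s ++ dAux s l) := by
  induction l with
  | nil => intro s; simp [dAux]
  | cons x xs ih =>
    intro s
    by_cases hx : x ∈ s
    · simpa [dAux, hx, PySem.Set.contains, set_add_eq] using ih s
    · simpa [dAux, hx, PySem.Set.contains, set_add_eq] using ih (s ++ [x])

lemma uniquePy_eq_dAux (l : List String) : uniquePy l = dAux [] l := by
  have := uniquePy_pair l []
  simp only [uniquePy, PySem.Set.empty]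
  rw [this]
  simp

lemma set_update_eq_dAux (l : List String) : ∀ s : List String,
    PySem.Set.update s l = s ++ dAux s l := by
  induction l with
  | nil => intro s; simp [dAux, PySem.Set.update]
  | cons x xs ih =>
    intro s
    by_cases hx : x ∈ s
    · simpa [PySem.Set.update, dAux, hx, set_add_eq] using ih s
    · have h1 : PySem.Set.update s (x :: xs) = PySem.Set.update (s ++ [x]) xs := by
        simp [PySem.Set.update, hx]
      rw [h1, ih (s ++ [x])]
      simp [dAux, hx]

lemma dedup_eq_dAux (l : List String) : PySem.List.dedup l = dAux [] l := by
  have h := set_update_eq_dAux l []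
  simp only [List.nil_append] at h
  rw [← h]
  simp [PySem.List.dedup_eq_ofList, PySem.Set.ofList, PySem.Set.update]

lemma dAux_append (l₁ l₂ : List String) : ∀ s,
    dAux s (l₁ ++ l₂) = dAux s l₁ ++ dAux (PySem.Set.update s l₁) l₂ := by
  induction l₁ with
  | nil => intro s; simp [dAux, PySem.Set.update]
  | cons x xs ih =>
    intro s
    by_cases hx : x ∈ s
    · simp [dAux, hx, PySem.Set.update, ih]
    · simp [dAux, hx, PySem.Set.update, ih]

lemma mem_update (s l : List String) (x : String) :
    x ∈ PySem.Set.update s l ↔ x ∈ s ∨ x ∈ dAux s l := by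
  rw [set_update_eq_dAux]; simp

-- dedup of an injectively-mapped list, relative to corresponding seen sets
lemma dAux_map (g : String → String) (hg : ∀ a b, g a = g b → a = b)
    (l : List String) : ∀ (S T : List String), (∀ v, g v ∈ S ↔ v ∈ T) →
    dAux S (l.map g) = (dAux T l).map g := by
  induction l with
  | nil => intro S T _; simp [dAux]
  | cons x xs ih =>
    intro S T hST
    by_cases hx : x ∈ T
    · have : g x ∈ S := (hST x).2 hx
      simp [dAux, this, hx, ih S T hST]
    · have : g x ∉ S := fun h => hx ((hST x).1 h)
      have hST' : ∀ v, g v ∈ S ++ [g x] ↔ v ∈ T ++ [x] := by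
        intro v
        simp only [List.mem_append, List.mem_singleton]
        constructor
        · rintro (h | h)
          · exact Or.inl ((hST v).1 h)
          · exact Or.inr (hg v x h)
        · rintro (h | h)
          · exact Or.inl ((hST v).2 h)
          · exact Or.inr (by rw [h])
      simp [dAux, this, hx, ih _ _ hST']

-- splitting at the first ':' is unambiguous
lemma colon_split (l₁ : List Char) : ∀ l₂ r₁ r₂ : List Char,
    (':' : Char) ∉ l₁ → (':' : Char) ∉ l₂ →
    l₁ ++ ':' :: r₁ = l₂ ++ ':' :: r₂ → l₁ = l₂ ∧ r₁ = r₂ := by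
  induction l₁ with
  | nil =>
    intro l₂ r₁ r₂ _ h₂ heq
    cases l₂ with
    | nil => simpa using heq
    | cons b t =>
      simp only [List.nil_append, List.cons_append, List.cons.injEq] at heq
      exact absurd (heq.1 ▸ List.mem_cons_self) h₂
  | cons a t ih =>
    intro l₂ r₁ r₂ h₁ h₂ heq
    cases l₂ with
    | nil =>
      simp only [List.nil_append, List.cons_append, List.cons.injEq] at heq
      exact absurd (heq.1 ▸ List.mem_cons_self) h₁
    | cons b t₂ =>
      simp only [List.cons_append, List.cons.injEq] at heq
      have := ih t₂ r₁ r₂ (fun h => h₁ (List.mem_cons_of_mem _ h))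
        (fun h => h₂ (List.mem_cons_of_mem _ h)) heq.2
      exact ⟨by simp [heq.1, this.1], this.2⟩

lemma fmt_inj (h h' v v' : String) (h1 : (':' : Char) ∉ h.toList)
    (h2 : (':' : Char) ∉ h'.toList)
    (heq : h ++ ": " ++ v = h' ++ ": " ++ v') : h = h' ∧ v = v' := by
  have hd : h.toList ++ ':' :: ' ' :: v.toList = h'.toList ++ ':' :: ' ' :: v'.toList := by
    have h3 := congrArg String.toList heq
    simp only [String.toList_append] at h3
    simpa [show (": " : String).toList = [':', ' '] from rfl] using h3
  have h4 := colon_split h.toList h'.toList (' ' :: v.toList) (' ' :: v'.toList) h1 h2 hd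
  refine ⟨?_, ?_⟩
  · apply String.ext; exact h4.1
  · apply String.ext; simpa using h4.2

-- the main induction: global dedup of the product = product with pre-deduped values
lemma main_ind (values : List String) : ∀ (hs : List String) (S : List String),
    hs.Pairwise (· ≠ ·) → (∀ h ∈ hs, (':' : Char) ∉ h.toList) →
    (∀ h ∈ hs, ∀ v, (h ++ ": " ++ v) ∉ S) →
    dAux S (hs.flatMap (fun h => values.map (fun v => h ++ ": " ++ v)))
      = hs.flatMap (fun h => (dAux [] values).map (fun v => h ++ ": " ++ v)) := by
  intro hs
  induction hs with
  | nil => intro S _ _ _; simp [dAux]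
  | cons h hs ih =>
    intro S hpw hnc hS
    rw [List.flatMap_cons, dAux_append]
    have hblock :
        dAux S (values.map (fun v => h ++ ": " ++ v))
          = (dAux [] values).map (fun v => h ++ ": " ++ v) := by
      apply dAux_map
      · intro a b hab
        exact (fmt_inj h h a b (hnc h List.mem_cons_self) (hnc h List.mem_cons_self) hab).2
      · intro v
        simp only [List.not_mem_nil, iff_false]
        exact hS h List.mem_cons_self v
    rw [hblock, List.flatMap_cons]
    congr 1
    apply ih
    · exact hpw.of_cons
    · exact fun h' hh' => hnc h' (List.mem_cons_of_mem _ hh')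
    · intro h' hh' v hv
      rcases (mem_update _ _ _).1 hv with hin | hin
      · exact hS h' (List.mem_cons_of_mem _ hh') v hin
      · rw [hblock] at hin
        rcases List.mem_map.1 hin with ⟨w, _, hw⟩
        have := (fmt_inj h h' w v (hnc h List.mem_cons_self)
          (hnc h' (List.mem_cons_of_mem _ hh')) hw).1
        exact (List.rel_of_pairwise_cons hpw hh') this

lemma headers_pairwise : pvHeaders.Pairwise (· ≠ ·) := by decide
lemma headers_noColon : ∀ h ∈ pvHeaders, (':' : Char) ∉ h.toList := by decide

-- A's nested appending loops build exactly the flatMap of the maps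
lemma inner_loop (values : List String) (f : String → String) : ∀ acc : List String,
    values.foldl (fun tmp value => tmp ++ [f value]) acc = acc ++ values.map f := by
  induction values with
  | nil => intro acc; simp
  | cons v vs ih => intro acc; simp [ih]

lemma outer_loop (values : List String) : ∀ (hs : List String) (acc : List String),
    hs.foldl (fun tmp header =>
        values.foldl (fun tmp value => tmp ++ [header ++ ": " ++ value]) tmp) acc
      = acc ++ hs.flatMap (fun h => values.map (fun v => h ++ ": " ++ v)) := by
  intro hs
  induction hs with
  | nil => intro acc; simp
  | cons h hs ih =>
    intro acc
    rw [List.foldl_cons, inner_loop, ih]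
    simp

-- ===== VERDICT (by name: the statement is the Claim_ definition above) =====
theorem get_url_headers_py_spec : Claim_equal_get_url_headers_py := by
  intro values _
  unfold Spec_get_url_headers_py get_url_headers_py get_url_headers_py_alt
  simp only [outer_loop, List.nil_append, uniquePy_eq_dAux, dedup_eq_dAux]
  exact main_ind values pvHeaders [] headers_pairwise headers_noColon (by simp)
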